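-- pv_equiv track=rewrite | github.com/chaitanyamalaviya/NeuralFactorGraph | utils.py | get_train_order
-- ===== SOURCE A (Python) =====
-- def get_train_order(training_data, batch_size, startIdx=0):
--   """
--   :param data: List of tuples of source sentences and morph tags
--   :return: start idxs of batches
--   """
--
--   lengths = [len(elem[0]) for elem in training_data]
--   start_idxs = []
--   end_idxs = []
--   prev_length=-1
--   batch_counter = 0
--
--   for i, length in enumerate(lengths, start=startIdx):
--
--     if length!=prev_length or batch_counter>batch_size:
--       start_idxs.append(i)
--       if prev_length!=-1:
--         end_idxs.append(i-1)
--       batch_counter = 1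
--
--     batch_counter += 1
--     prev_length = length
--
--   end_idxs.append(startIdx + len(lengths)-1)
--
--   return [(s,e) for s,e in zip(start_idxs, end_idxs)]
-- ===== SOURCE B (Python) =====
-- def get_train_order(training_data, batch_size, startIdx=0):
--     # Two-stage algorithm: (1) run-length encode the sentence lengths into
--     # maximal runs of equal length; (2) cut each run into fixed-size chunks
--     # arithmetically with a stepped range (batches hold at most
--     # max(batch_size, 1) items) -- no per-element boundary state machine.
--     runs = []  # [length, count] per maximal run of equal lengths
--     for elem in training_data:
--         L = len(elem[0])
--         if runs and runs[-1][0] == L: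
--             runs[-1][1] += 1
--         else:
--             runs.append([L, 1])
--     cap = batch_size if batch_size > 0 else 1
--     res = []
--     i = startIdx
--     for _, n in runs:
--         for off in range(0, n, cap):
--             res.append((i + off, i + min(off + cap, n) - 1))
--         i += n
--     return res
-- ===== Notes on version B (the rewrite author's own statement) =====
-- stated objective: alternative
-- what changed: Replaces A's per-element boundary state machine (prev length + batch counter with interleaved start/end lists and a zip) by a two-stage algorithm: run-length encode the lengths into maximal equal-length runs, then cut each run into chunks of max(batch_size,1) arithmetically with a stepped range.
import Mathlib
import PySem

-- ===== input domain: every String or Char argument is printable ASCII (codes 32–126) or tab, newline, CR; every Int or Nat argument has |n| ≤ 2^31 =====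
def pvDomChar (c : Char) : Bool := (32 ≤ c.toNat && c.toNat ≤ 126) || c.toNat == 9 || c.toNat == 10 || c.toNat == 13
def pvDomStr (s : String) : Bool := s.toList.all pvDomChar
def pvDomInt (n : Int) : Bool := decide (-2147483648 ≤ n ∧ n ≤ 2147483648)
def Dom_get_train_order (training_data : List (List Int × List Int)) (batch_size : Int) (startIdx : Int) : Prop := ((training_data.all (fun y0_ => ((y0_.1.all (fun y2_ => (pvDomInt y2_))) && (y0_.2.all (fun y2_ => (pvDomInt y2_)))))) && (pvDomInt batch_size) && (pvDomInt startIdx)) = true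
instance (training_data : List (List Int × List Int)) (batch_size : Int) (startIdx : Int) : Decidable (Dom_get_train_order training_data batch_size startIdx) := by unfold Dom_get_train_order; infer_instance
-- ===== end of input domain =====

-- B replaces A's per-element boundary state machine by run-length encoding the
-- lengths and cutting each run into fixed-size chunks arithmetically; objective: alternative.

-- ===== PORT A =====
-- loop body of A's for-loop; state = (start_idxs, end_idxs, prev_length, batch_counter, i)
def stepA (batch_size : Int) (st : List Int × List Int × Int × Int × Int) (length : Int) :
    List Int × List Int × Int × Int × Int :=
  let starts := st.1; let ends := st.2.1; let prev := st.2.2.1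
  let bc := st.2.2.2.1; let i := st.2.2.2.2
  let (starts, ends, bc) :=
    if length ≠ prev ∨ bc > batch_size then
      (starts ++ [i], if prev ≠ -1 then ends ++ [i - 1] else ends, (1 : Int))
    else (starts, ends, bc)
  (starts, ends, length, bc + 1, i + 1)

def get_train_order (training_data : List (List Int × List Int)) (batch_size : Int) (startIdx : Int) : List (Int × Int) :=
  let lengths : List Int := training_data.map (fun elem => (elem.1.length : Int))
  let fin := lengths.foldl (stepA batch_size) ([], [], -1, 0, startIdx)
  let end_idxs := fin.2.1 ++ [startIdx + (lengths.length : Int) - 1]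
  fin.1.zip end_idxs

-- ===== PORT B =====
-- B's first loop body: run-length encoding step (runs[-1][1] += 1, or append [L, 1])
def rleStep (runs : List (Int × Int)) (L : Int) : List (Int × Int) :=
  match runs.getLast? with
  | some r => if r.1 = L then runs.dropLast ++ [(r.1, r.2 + 1)] else runs ++ [(L, 1)]
  | none => runs ++ [(L, 1)]

-- B's inner loop: for off in range(0, n, cap): append (i+off, i+min(off+cap, n)-1)
def chunkRun (cap i n : Int) : List (Int × Int) :=
  (PySem.List.pyRange 0 n cap).map (fun off => (i + off, i + min (off + cap) n - 1))

-- B's second loop body; state = (res, i)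
def chunkStep (cap : Int) (st : List (Int × Int) × Int) (r : Int × Int) : List (Int × Int) × Int :=
  (st.1 ++ chunkRun cap st.2 r.2, st.2 + r.2)

def get_train_order_alt (training_data : List (List Int × List Int)) (batch_size : Int) (startIdx : Int) : List (Int × Int) :=
  let runs := training_data.foldl (fun runs elem => rleStep runs (elem.1.length : Int)) []
  let cap := if batch_size > 0 then batch_size else 1
  (runs.foldl (chunkStep cap) ([], startIdx)).1

-- ===== PRECONDITION & SPEC =====
def Spec_get_train_order (training_data : List (List Int × List Int)) (batch_size : Int) (startIdx : Int) (out : List (Int × Int)) : Prop := out = get_train_order_alt training_data batch_size startIdx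
instance (training_data : List (List Int × List Int)) (batch_size : Int) (startIdx : Int) (out : List (Int × Int)) : Decidable (Spec_get_train_order training_data batch_size startIdx out) := by unfold Spec_get_train_order; infer_instance

-- ===== CLAIM (what is proved, stated in full; the proofs are below) =====
def Claim_equal_get_train_order : Prop := ∀ (training_data : List (List Int × List Int)) (batch_size : Int) (startIdx : Int), Dom_get_train_order training_data batch_size startIdx → Spec_get_train_order training_data batch_size startIdx (get_train_order training_data batch_size startIdx)

-- ===== LEMMAS AND PROOFS =====

-- the k full chunks of a run starting at index i
def fullChunks (cap i : Int) (k : Nat) : List (Int × Int) :=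
  (List.range k).map (fun j : Nat => (i + cap * (j : Int), i + (cap * (j : Int) + cap) - 1))

-- a run of n = cap*k + cnt elements (1 ≤ cnt ≤ cap) is k full chunks plus a last chunk
lemma chunk_split (cap i n cnt : Int) (k : Nat) (hcap : 1 ≤ cap)
    (hn : n = cap * k + cnt) (h1 : 1 ≤ cnt) (h2 : cnt ≤ cap) :
    chunkRun cap i n = fullChunks cap i k ++ [(i + cap * k, i + n - 1)] := by
  have hk0 : (0:Int) ≤ (k:Int) * cap := by positivity
  have hn1 : (0:Int) < n := by nlinarith
  have hcount : ((n - 0 + cap - 1) / cap).toNat = k + 1 := by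
    have h : n - 0 + cap - 1 = (cnt - 1) + (k + 1) * cap := by push_cast [hn]; ring
    rw [h, Int.add_mul_ediv_right _ _ (by omega : cap ≠ 0),
        Int.ediv_eq_zero_of_lt (by omega) (by omega)]
    omega
  unfold chunkRun fullChunks
  rw [PySem.List.pyRange_of_pos 0 n (by omega : (0:Int) < cap)]
  rw [if_pos hn1, hcount, List.map_map, List.range_succ, List.map_append]
  congr 1
  · apply List.map_congr_left
    intro j hj
    have hjle : ((j:Int) + 1) ≤ (k:Int) := by
      have := List.mem_range.mp hj; omega
    have hle : 0 + cap * (j:Int) + cap ≤ n := by nlinarith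
    simp only [Function.comp_apply]
    rw [min_eq_left hle]
    simp only [zero_add]
  · have hge : n ≤ 0 + cap * (k:Int) + cap := by omega
    simp only [List.map_cons, List.map_nil, Function.comp_apply]
    rw [min_eq_right hge]
    simp only [zero_add]

-- rleStep only touches the tail of the run list
lemma rle_cons (r : Int × Int) (tail : List (Int × Int)) (h : tail ≠ []) (L : Int) :
    rleStep (r :: tail) L = r :: rleStep tail L := by
  obtain ⟨t, ts, rfl⟩ := List.exists_cons_of_ne_nil h
  unfold rleStep
  simp only [List.getLast?_cons_cons, List.dropLast_cons₂, List.cons_append]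
  split
  · split <;> rfl
  · rfl

lemma rleStep_ne_nil (runs : List (Int × Int)) (L : Int) : rleStep runs L ≠ [] := by
  unfold rleStep
  split
  · split <;> simp
  · simp

lemma foldl_rle_cons (rest : List Int) :
    ∀ (r : Int × Int) (tail : List (Int × Int)), tail ≠ [] →
    rest.foldl rleStep (r :: tail) = r :: rest.foldl rleStep tail := by
  induction rest with
  | nil => intro r tail h; rfl
  | cons x rest ih =>
    intro r tail h
    simp only [List.foldl_cons]
    rw [rle_cons r tail h x]
    exact ih r _ (rleStep_ne_nil tail x)

-- the final index of A's fold
lemma stepA_i (bs : Int) (ls : List Int) :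
    ∀ st : List Int × List Int × Int × Int × Int,
    (ls.foldl (stepA bs) st).2.2.2.2 = st.2.2.2.2 + ls.length := by
  induction ls with
  | nil => intro st; simp
  | cons x ls ih =>
    intro st
    obtain ⟨s, e, p, b, i⟩ := st
    simp only [List.foldl_cons, List.length_cons, ih]
    have : (stepA bs (s, e, p, b, i) x).2.2.2.2 = i + 1 := by
      by_cases h : x ≠ p ∨ b > bs <;> simp [stepA, h]
    rw [this]; push_cast; ring

-- zipping the two projections back together
lemma zip_proj (a : List (Int × Int)) (x y : Int) :
    (a.map Prod.fst ++ [x]).zip (a.map Prod.snd ++ [y]) = a ++ [(x, y)] := by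
  induction a with
  | nil => rfl
  | cons p a ih => simp only [List.map_cons, List.cons_append, List.zip_cons_cons, ih]

-- Main loop invariant: in the middle of a run (L, n), n = cap*k + cnt with 1 ≤ cnt ≤ cap,
-- A's state consists of the projections of the chunks produced so far (res0 ++ fullChunks)
-- plus the open chunk's start, and finishing A's fold from there produces exactly what
-- B's chunking of the remaining runs (accumulated by rleStep from [(L, n)]) produces.
lemma loopAB (bs : Int) (cap : Int) (hcap : cap = if bs > 0 then bs else 1) :
    ∀ (rest : List Int) (res0 : List (Int × Int)) (i0 L n cnt : Int) (k : Nat),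
    0 ≤ L → n = cap * k + cnt → 1 ≤ cnt → cnt ≤ cap → (∀ x ∈ rest, 0 ≤ x) →
    (let fin := rest.foldl (stepA bs)
        ((res0 ++ fullChunks cap i0 k).map Prod.fst ++ [i0 + cap * k],
         (res0 ++ fullChunks cap i0 k).map Prod.snd, L, cnt + 1, i0 + n)
     fin.1.zip (fin.2.1 ++ [fin.2.2.2.2 - 1]))
      = ((rest.foldl rleStep [(L, n)]).foldl (chunkStep cap) (res0, i0)).1 := by
  have hcap1 : 1 ≤ cap := by rw [hcap]; split <;> omega
  intro rest
  induction rest with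
  | nil =>
    intro res0 i0 L n cnt k hL hn h1 h2 _
    simp only [List.foldl_nil, List.foldl_cons, chunkStep]
    rw [zip_proj]
    rw [chunk_split cap i0 n cnt k hcap1 hn h1 h2]
    simp
  | cons x rest ih =>
    intro res0 i0 L n cnt k hL hn h1 h2 hrest
    have hx : 0 ≤ x := hrest x (by simp)
    have hrest' : ∀ y ∈ rest, 0 ≤ y := fun y hy => hrest y (by simp [hy])
    simp only [List.foldl_cons]
    by_cases hxL : x = L
    · subst hxL
      by_cases hcnt : cnt < cap
      · -- same run, room in the batch: A extends, rle bumps the count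
        have hbs : ¬ (cnt + 1 > bs) := by
          by_cases h : bs > 0
          · rw [hcap, if_pos h] at hcnt; omega
          · rw [hcap, if_neg h] at hcnt; omega
        have hA : stepA bs
            ((res0 ++ fullChunks cap i0 k).map Prod.fst ++ [i0 + cap * k],
             (res0 ++ fullChunks cap i0 k).map Prod.snd, x, cnt + 1, i0 + n) x
            = ((res0 ++ fullChunks cap i0 k).map Prod.fst ++ [i0 + cap * k],
               (res0 ++ fullChunks cap i0 k).map Prod.snd, x, cnt + 1 + 1, i0 + n + 1) := by
          simp only [stepA]
          rw [if_neg (by push_neg; exact ⟨rfl, by omega⟩)]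
        have hR : rleStep [(x, n)] x = [(x, n + 1)] := by
          unfold rleStep; simp
        rw [hA, hR]
        have := ih res0 i0 x (n + 1) (cnt + 1) k hx (by rw [hn]; ring) (by omega) (by omega) hrest'
        rw [show i0 + (n + 1) = i0 + n + 1 by ring] at this
        exact this
      · -- same run, batch full: A opens a new batch, rle still bumps the count
        have hcnt' : cnt = cap := by omega
        have hbs : cnt + 1 > bs := by
          by_cases h : bs > 0
          · rw [hcap, if_pos h] at hcnt'; omega
          · omega
        have hA : stepA bs
            ((res0 ++ fullChunks cap i0 k).map Prod.fst ++ [i0 + cap * k],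
             (res0 ++ fullChunks cap i0 k).map Prod.snd, x, cnt + 1, i0 + n) x
            = ((res0 ++ fullChunks cap i0 k).map Prod.fst ++ [i0 + cap * k] ++ [i0 + n],
               (res0 ++ fullChunks cap i0 k).map Prod.snd ++ [i0 + n - 1], x, 2, i0 + n + 1) := by
          simp only [stepA]
          rw [if_pos (Or.inr hbs), if_pos (by omega : x ≠ -1)]
          rfl
        have hR : rleStep [(x, n)] x = [(x, n + 1)] := by
          unfold rleStep; simp
        rw [hA, hR]
        have hfc : fullChunks cap i0 (k + 1)
            = fullChunks cap i0 k ++ [(i0 + cap * k, i0 + (cap * k + cap) - 1)] := by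
          unfold fullChunks; rw [List.range_succ, List.map_append]; rfl
        have := ih res0 i0 x (n + 1) 1 (k + 1) hx (by push_cast; rw [hn, hcnt']; ring) le_rfl hcap1 hrest'
        rw [hfc] at this
        push_cast at this
        rw [show i0 + cap * ((k : Int) + 1) = i0 + n by rw [hn, hcnt']; ring] at this
        rw [show i0 + (n + 1) = i0 + n + 1 by ring] at this
        rw [show i0 + (cap * (k : Int) + cap) - 1 = i0 + n - 1 by rw [hn, hcnt']] at this
        simp only [List.append_assoc, List.map_append, List.map_cons, List.map_nil] at this ⊢
        exact this
    · -- new run: A opens a new batch, rle appends a fresh run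
      have hA : stepA bs
          ((res0 ++ fullChunks cap i0 k).map Prod.fst ++ [i0 + cap * k],
           (res0 ++ fullChunks cap i0 k).map Prod.snd, L, cnt + 1, i0 + n) x
          = ((res0 ++ fullChunks cap i0 k).map Prod.fst ++ [i0 + cap * k] ++ [i0 + n],
             (res0 ++ fullChunks cap i0 k).map Prod.snd ++ [i0 + n - 1], x, 2, i0 + n + 1) := by
        simp only [stepA]
        rw [if_pos (Or.inl hxL), if_pos (by omega : L ≠ -1)]
        rfl
      have hR : rleStep [(L, n)] x = [(L, n), (x, 1)] := by
        unfold rleStep; simp [show ¬ (L = x) from fun h => hxL h.symm]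
      rw [hA, hR, foldl_rle_cons rest (L, n) [(x, 1)] (by simp)]
      have hcs : ∀ tl : List (Int × Int),
          ((L, n) :: tl).foldl (chunkStep cap) (res0, i0)
            = tl.foldl (chunkStep cap) (res0 ++ chunkRun cap i0 n, i0 + n) := by
        intro tl; rfl
      rw [hcs]
      have := ih (res0 ++ chunkRun cap i0 n) (i0 + n) x 1 1 0 hx (by push_cast; ring)
        le_rfl hcap1 hrest'
      rw [chunk_split cap i0 n cnt k hcap1 hn h1 h2] at this ⊢
      push_cast at this
      rw [show i0 + n + cap * (0 : Int) = i0 + n by ring] at this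
      simp only [fullChunks, List.range_zero, List.map_nil, List.append_nil,
        List.append_assoc, List.map_append, List.map_cons, List.map_nil] at this ⊢
      exact this

-- ===== VERDICT (by name: the statement is the Claim_ definition above) =====
theorem get_train_order_spec : Claim_equal_get_train_order := by
  intro td bs si _
  unfold Spec_get_train_order get_train_order get_train_order_alt
  have hfm : ∀ (l : List (List Int × List Int)) (init : List (Int × Int)),
      l.foldl (fun runs elem => rleStep runs (elem.1.length : Int)) init
        = (l.map (fun elem => (elem.1.length : Int))).foldl rleStep init := by
    intro l
    induction l with
    | nil => intro init; rfl
    | cons e t ih => intro init; simp only [List.map_cons, List.foldl_cons, ih]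
  rw [hfm]
  generalize hls : td.map (fun elem => (elem.1.length : Int)) = ls
  have hlen : (ls.length : Int) = (td.length : Int) := by rw [← hls]; simp
  have hnn : ∀ x ∈ ls, 0 ≤ x := by
    intro x hx; rw [← hls] at hx
    obtain ⟨e, _, rfl⟩ := List.mem_map.mp hx
    exact Int.natCast_nonneg _
  cases ls with
  | nil => rfl
  | cons x rest =>
    have hx : 0 ≤ x := hnn x (by simp)
    have hrest : ∀ y ∈ rest, 0 ≤ y := fun y hy => hnn y (by simp [hy])
    set cap := if bs > 0 then bs else 1 with hcap
    simp only [List.foldl_cons]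
    have hA1 : stepA bs ([], [], -1, 0, si) x = ([si], [], x, 2, si + 1) := by
      simp only [stepA]
      rw [if_pos (Or.inl (by omega : x ≠ -1))]
      simp
    have hR1 : rleStep [] x = [(x, 1)] := by unfold rleStep; rfl
    rw [hA1, hR1]
    have hmain := loopAB bs cap hcap rest [] si x 1 1 0 hx (by push_cast; ring)
      (le_refl 1) (by rw [hcap]; split <;> omega) hrest
    simp only [fullChunks, List.range_zero, List.map_nil, List.append_nil,
      List.nil_append] at hmain
    have he1 : si + cap * (0:Nat) = si := by push_cast; ring
    have he2 : (1:Int) + 1 = 2 := rfl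
    rw [he1, he2, show si + 1 = si + (1:Int) from rfl] at hmain
    have hifin : (rest.foldl (stepA bs) ([si], [], x, 2, si + 1)).2.2.2.2
        = si + 1 + rest.length := stepA_i bs rest _
    rw [show si + ((x :: rest).length : Int) - 1 = si + 1 + rest.length - 1 by push_cast [List.length_cons]; ring]
    rw [← hifin]
    exact hmain
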